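-- pv_equiv track=rewrite | github.com/isjiajia01/cph-robust-transfers | src/app/results_dashboard.py | _find_stop_record
-- ===== SOURCE A (Python) =====
-- def _find_stop_record(
--     stop_id: str,
--     stop_name: str,
--     by_id: dict[str, dict[str, str]],
--     rows: list[dict[str, str]],
-- ) -> dict[str, str] | None:
--     if stop_id and stop_id in by_id:
--         return by_id[stop_id]
--
--     target = stop_name.strip().lower()
--     if not target:
--         return None
--
--     for row in rows:
--         if row.get("stop_name", "").strip().lower() == target:
--             return row
--
--     for row in rows:
--         if target in row.get("stop_name", "").strip().lower():
--             return row
--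
--     return None
-- ===== SOURCE B (Python) =====
-- def _find_stop_record(
--     stop_id: str,
--     stop_name: str,
--     by_id: dict[str, dict[str, str]],
--     rows: list[dict[str, str]],
-- ) -> dict[str, str] | None:
--     if stop_id and stop_id in by_id:
--         return by_id[stop_id]
--
--     target = stop_name.strip().lower()
--     if not target:
--         return None
--
--     fallback = None
--     for row in rows:
--         name = row.get("stop_name", "").strip().lower()
--         if name == target:
--             return row
--         if fallback is None and target in name:
--             fallback = row
--     return fallback
-- ===== Notes on version B (the rewrite author's own statement) =====
-- stated objective: simpler
-- what changed: Replaced A's two separate scans over rows (exact-match pass, then substring pass) by a single pass that returns immediately on an exact match and records the first substring match as a fallback returned after the loop.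
import Mathlib
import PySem

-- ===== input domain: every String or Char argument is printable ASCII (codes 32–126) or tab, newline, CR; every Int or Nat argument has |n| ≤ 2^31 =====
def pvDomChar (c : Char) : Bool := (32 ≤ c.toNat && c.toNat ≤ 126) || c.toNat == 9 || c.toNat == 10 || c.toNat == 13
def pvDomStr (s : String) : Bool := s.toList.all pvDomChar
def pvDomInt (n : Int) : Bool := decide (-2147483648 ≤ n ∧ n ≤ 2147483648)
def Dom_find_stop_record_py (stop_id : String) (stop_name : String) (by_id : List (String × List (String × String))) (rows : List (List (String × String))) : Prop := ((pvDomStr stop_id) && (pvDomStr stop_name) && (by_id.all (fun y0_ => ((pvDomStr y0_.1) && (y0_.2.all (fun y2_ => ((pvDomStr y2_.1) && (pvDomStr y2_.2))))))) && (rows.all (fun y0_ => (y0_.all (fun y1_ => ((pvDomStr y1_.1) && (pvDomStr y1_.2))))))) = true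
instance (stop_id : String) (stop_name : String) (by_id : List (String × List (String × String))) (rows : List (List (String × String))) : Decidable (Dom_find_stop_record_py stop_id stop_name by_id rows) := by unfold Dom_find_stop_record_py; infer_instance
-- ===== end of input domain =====

-- ===== PORT A =====
-- B replaces A's two scans over rows by one pass with a fallback accumulator (simpler).
def find_stop_record_py (stop_id : String) (stop_name : String) (by_id : List (String × List (String × String))) (rows : List (List (String × String))) : Option (List (String × String)) :=
  if stop_id ≠ "" ∧ (PySem.Dict.mk by_id).contains stop_id = true then
    (PySem.Dict.mk by_id).get? stop_id
  else
    let target := PySem.Str.lower (PySem.Str.strip stop_name)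
    if target = "" then none
    else
      match rows.find? (fun row => PySem.Str.lower (PySem.Str.strip (PySem.Dict.getD (PySem.Dict.mk row) "stop_name" "")) == target) with
      | some row => some row
      | none =>
        match rows.find? (fun row => PySem.Str.isIn target (PySem.Str.lower (PySem.Str.strip (PySem.Dict.getD (PySem.Dict.mk row) "stop_name" "")))) with
        | some row => some row
        | none => none

-- ===== PORT B =====
def findStopLoop (target : String) (fallback : Option (List (String × String))) : List (List (String × String)) → Option (List (String × String))
  | [] => fallback
  | row :: rest =>
    let name := PySem.Str.lower (PySem.Str.strip (PySem.Dict.getD (PySem.Dict.mk row) "stop_name" ""))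
    if name == target then some row
    else if fallback.isNone && PySem.Str.isIn target name then findStopLoop target (some row) rest
    else findStopLoop target fallback rest

def find_stop_record_py_alt (stop_id : String) (stop_name : String) (by_id : List (String × List (String × String))) (rows : List (List (String × String))) : Option (List (String × String)) :=
  if stop_id ≠ "" ∧ (PySem.Dict.mk by_id).contains stop_id = true then
    (PySem.Dict.mk by_id).get? stop_id
  else
    let target := PySem.Str.lower (PySem.Str.strip stop_name)
    if target = "" then none
    else findStopLoop target none rows

-- ===== PRECONDITION & SPEC =====
def Spec_find_stop_record_py (stop_id : String) (stop_name : String) (by_id : List (String × List (String × String))) (rows : List (List (String × String))) (out : Option (List (String × String))) : Prop := out = find_stop_record_py_alt stop_id stop_name by_id rows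
instance (stop_id : String) (stop_name : String) (by_id : List (String × List (String × String))) (rows : List (List (String × String))) (out : Option (List (String × String))) : Decidable (Spec_find_stop_record_py stop_id stop_name by_id rows out) := by unfold Spec_find_stop_record_py; infer_instance

-- ===== CLAIM (what is proved, stated in full; the proofs are below) =====
def Claim_equal_find_stop_record_py : Prop := ∀ (stop_id : String) (stop_name : String) (by_id : List (String × List (String × String))) (rows : List (List (String × String))), Dom_find_stop_record_py stop_id stop_name by_id rows → Spec_find_stop_record_py stop_id stop_name by_id rows (find_stop_record_py stop_id stop_name by_id rows)

-- ===== LEMMAS AND PROOFS =====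
def pvNorm (row : List (String × String)) : String :=
  PySem.Str.lower (PySem.Str.strip (PySem.Dict.getD (PySem.Dict.mk row) "stop_name" ""))

lemma findStopLoop_eq (t : String) (fb : Option (List (String × String))) (rows : List (List (String × String))) :
    findStopLoop t fb rows =
      match rows.find? (fun row => pvNorm row == t) with
      | some r => some r
      | none =>
        match fb with
        | some f => some f
        | none => rows.find? (fun row => PySem.Str.isIn t (pvNorm row)) := by
  induction rows generalizing fb with
  | nil => cases fb <;> simp [findStopLoop]
  | cons row rest ih =>
    by_cases h1 : (pvNorm row == t) = true
    · rw [List.find?_cons_of_pos (p := fun row => pvNorm row == t) h1]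
      simp only [findStopLoop]
      rw [show (PySem.Str.lower (PySem.Str.strip (PySem.Dict.getD (PySem.Dict.mk row) "stop_name" ""))) = pvNorm row from rfl, if_pos h1]
    · have h1' : (pvNorm row == t) = false := by simpa using h1
      rw [List.find?_cons_of_neg (p := fun row => pvNorm row == t) h1]
      simp only [findStopLoop]
      rw [show (PySem.Str.lower (PySem.Str.strip (PySem.Dict.getD (PySem.Dict.mk row) "stop_name" ""))) = pvNorm row from rfl]
      rw [if_neg h1]
      cases fb with
      | some f =>
        rw [if_neg (by simp), ih]
      | none =>
        by_cases h2 : PySem.Str.isIn t (pvNorm row) = true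
        · rw [if_pos (by simpa using h2), ih]
          cases rest.find? (fun row => pvNorm row == t) with
          | some r => rfl
          | none =>
            rw [List.find?_cons_of_pos (p := fun row => PySem.Str.isIn t (pvNorm row)) h2]
        · have h2' : PySem.Str.isIn t (pvNorm row) = false := by simpa using h2
          rw [if_neg (by simpa using h2'), ih]
          cases rest.find? (fun row => pvNorm row == t) with
          | some r => rfl
          | none =>
            rw [List.find?_cons_of_neg (p := fun row => PySem.Str.isIn t (pvNorm row)) h2]

-- ===== VERDICT (by name: the statement is the Claim_ definition above) =====
theorem find_stop_record_py_spec : Claim_equal_find_stop_record_py := by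
  intro stop_id stop_name by_id rows _
  unfold Spec_find_stop_record_py find_stop_record_py find_stop_record_py_alt
  by_cases hid : stop_id ≠ "" ∧ (PySem.Dict.mk by_id).contains stop_id = true
  · rw [if_pos hid, if_pos hid]
  · rw [if_neg hid, if_neg hid]
    by_cases htg : PySem.Str.lower (PySem.Str.strip stop_name) = ""
    · show (if PySem.Str.lower (PySem.Str.strip stop_name) = "" then _ else _) = (if PySem.Str.lower (PySem.Str.strip stop_name) = "" then _ else _)
      rw [if_pos htg, if_pos htg]
    · show (if PySem.Str.lower (PySem.Str.strip stop_name) = "" then _ else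
          match rows.find? (fun row => pvNorm row == PySem.Str.lower (PySem.Str.strip stop_name)) with
          | some row => some row
          | none =>
            match rows.find? (fun row => PySem.Str.isIn (PySem.Str.lower (PySem.Str.strip stop_name)) (pvNorm row)) with
            | some row => some row
            | none => none) =
        (if PySem.Str.lower (PySem.Str.strip stop_name) = "" then _ else
          findStopLoop (PySem.Str.lower (PySem.Str.strip stop_name)) none rows)
      rw [if_neg htg, if_neg htg, findStopLoop_eq]
      cases rows.find? (fun row => pvNorm row == PySem.Str.lower (PySem.Str.strip stop_name)) with
      | some r => rfl
      | none =>
        cases rows.find? (fun row => PySem.Str.isIn (PySem.Str.lower (PySem.Str.strip stop_name)) (pvNorm row)) with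
        | some r => rfl
        | none => rfl
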